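-- pv_equiv track=rewrite | github.com/AUK024/Hastech | backend/app/services/mail_processing_service.py | _is_turkish_language
-- ===== SOURCE A (Python) =====
-- def _is_turkish_language(language_code: str, configured_codes_raw: str) -> bool:
--     normalized_language = (language_code or '').strip().lower().replace('_', '-')
--     if not normalized_language:
--         return False
--     configured_codes = {
--         code.strip().lower().replace('_', '-')
--         for code in configured_codes_raw.split(',')
--         if code.strip()
--     }
--     if not configured_codes:
--         configured_codes = {'tr', 'tr-tr'}
--
--     for code in configured_codes:
--         if normalized_language == code or normalized_language.startswith(f'{code}-'):
--             return True
--     return False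
-- ===== SOURCE B (Python) =====
-- def _is_turkish_language(language_code: str, configured_codes_raw: str) -> bool:
--     normalized = (language_code or '').strip().lower().replace('_', '-')
--     if not normalized:
--         return False
--     configured = {
--         code.strip().lower().replace('_', '-')
--         for code in configured_codes_raw.split(',')
--         if code.strip()
--     }
--     if not configured:
--         configured = {'tr', 'tr-tr'}
--     # Instead of scanning each configured code with startswith, probe the
--     # dash-boundary prefixes of the query itself against the set.
--     boundaries = [i for i, ch in enumerate(normalized) if ch == '-']
--     boundaries.append(len(normalized))
--     return any(normalized[:i] in configured for i in boundaries)
-- ===== Notes on version B (the rewrite author's own statement) =====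
-- stated objective: alternative
-- what changed: Instead of scanning every configured code and testing equality/startswith per code, B enumerates the dash-boundary prefixes of the normalized query (dash positions plus the full length) and probes each prefix for membership in the configured set.
import Mathlib
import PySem

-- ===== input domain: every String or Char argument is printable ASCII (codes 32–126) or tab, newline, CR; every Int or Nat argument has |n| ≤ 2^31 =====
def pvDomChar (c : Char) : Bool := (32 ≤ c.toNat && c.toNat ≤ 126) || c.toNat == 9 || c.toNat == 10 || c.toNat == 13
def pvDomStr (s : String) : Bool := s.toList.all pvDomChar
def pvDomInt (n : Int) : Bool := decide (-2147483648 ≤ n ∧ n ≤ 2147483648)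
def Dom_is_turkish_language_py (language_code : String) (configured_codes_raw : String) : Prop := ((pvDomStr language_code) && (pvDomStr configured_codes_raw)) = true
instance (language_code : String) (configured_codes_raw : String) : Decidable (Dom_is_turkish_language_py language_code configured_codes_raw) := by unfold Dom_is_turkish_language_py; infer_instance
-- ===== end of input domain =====

-- B replaces A's scan of the configured codes (equality / startswith per code) by probing the
-- dash-boundary prefixes of the normalized query against the configured set (objective: alternative).

-- shared normalization/config parsing (identical lines in both Pythons)
def pvNormalize (s : String) : String :=
  PySem.Str.replace (PySem.Str.lower (PySem.Str.strip s)) "_" "-"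

-- set comprehension over configured_codes_raw.split(','), with the {'tr','tr-tr'} fallback
-- (split? is some: the separator "," is a nonempty literal)
def pvConfigured (configured_codes_raw : String) : PySem.Set String :=
  let codes : PySem.Set String := PySem.Set.ofList
    ((((PySem.Str.split? configured_codes_raw ",").getD []).filter
        (fun c => !(PySem.Str.strip c == ""))).map pvNormalize)
  if codes = [] then PySem.Set.ofList ["tr", "tr-tr"] else codes

-- ===== PORT A =====
def is_turkish_language_py (language_code : String) (configured_codes_raw : String) : Bool :=
  let normalized := pvNormalize language_code
  if normalized == "" then false
  else
    let configured := pvConfigured configured_codes_raw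
    -- 'for code in configured: if …: return True / return False' — order-independent, hence any
    configured.any (fun code =>
      normalized == code || PySem.Str.startswith normalized (code ++ "-"))

-- ===== PORT B =====
def is_turkish_language_py_alt (language_code : String) (configured_codes_raw : String) : Bool :=
  let normalized := pvNormalize language_code
  if normalized == "" then false
  else
    let configured := pvConfigured configured_codes_raw
    let boundaries : List Int :=
      (((PySem.List.enumerate normalized.toList).filter (fun p => p.2 == '-')).map
        (fun p => p.1)) ++ [(normalized.toList.length : Int)]
    boundaries.any (fun i =>
      PySem.Set.contains configured (PySem.Str.slice normalized none (some i)))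

-- ===== PRECONDITION & SPEC =====
def Spec_is_turkish_language_py (language_code : String) (configured_codes_raw : String) (out : Bool) : Prop := out = is_turkish_language_py_alt language_code configured_codes_raw
instance (language_code : String) (configured_codes_raw : String) (out : Bool) : Decidable (Spec_is_turkish_language_py language_code configured_codes_raw out) := by unfold Spec_is_turkish_language_py; infer_instance

-- ===== CLAIM (what is proved, stated in full; the proofs are below) =====
def Claim_equal_is_turkish_language_py : Prop := ∀ (language_code : String) (configured_codes_raw : String), Dom_is_turkish_language_py language_code configured_codes_raw → Spec_is_turkish_language_py language_code configured_codes_raw (is_turkish_language_py language_code configured_codes_raw)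

-- ===== LEMMAS AND PROOFS =====

-- membership in B's boundary list: the dash positions plus the length
theorem pv_mem_boundaries (cs : List Char) (i : Int) :
    i ∈ (((PySem.List.enumerate cs).filter (fun p => p.2 == '-')).map (fun p => p.1))
          ++ [(cs.length : Int)]
      ↔ ∃ k : Nat, i = (k : Int) ∧ (k = cs.length ∨ cs[k]? = some '-') := by
  simp only [List.mem_append, List.mem_map, List.mem_filter, List.mem_singleton,
    PySem.List.enumerate_eq_zipIdx_map]
  constructor
  · rintro (⟨_, ⟨⟨⟨c1, k1⟩, hmem, rfl⟩, hdash⟩, rfl⟩ | rfl)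
    · simp only [beq_iff_eq] at hdash
      refine ⟨k1, by simp, Or.inr ?_⟩
      have := List.mk_mem_zipIdx_iff_getElem?.mp hmem
      rw [this, hdash]
    · exact ⟨cs.length, rfl, Or.inl rfl⟩
  · rintro ⟨k, rfl, hk | hget⟩
    · exact Or.inr (by simp [hk])
    · exact Or.inl ⟨((0 : Int) + k, cs[k]!), ⟨⟨(cs[k]!, k),
        List.mk_mem_zipIdx_iff_getElem?.mpr (by simp [List.getElem!_eq_getElem?_getD, hget]), rfl⟩,
        by simp [List.getElem!_eq_getElem?_getD, hget]⟩, by simp⟩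

-- A's per-code test characterized by dash-boundary prefixes (char level)
theorem pv_prefix_dash (cs code : List Char) :
    (cs = code ∨ code ++ ['-'] <+: cs)
      ↔ ∃ k : Nat, (k = cs.length ∨ cs[k]? = some '-') ∧ code = cs.take k := by
  constructor
  · rintro (rfl | ⟨t, ht⟩)
    · exact ⟨cs.length, Or.inl rfl, (List.take_length).symm⟩
    · refine ⟨code.length, Or.inr ?_, ?_⟩
      · rw [← ht]; simp
      · rw [← ht]; simp
  · rintro ⟨k, hk | hget, rfl⟩
    · exact Or.inl (by simp [hk])
    · right
      have hlt : k < cs.length := (List.getElem?_eq_some_iff.mp hget).1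
      refine ⟨cs.drop (k + 1), ?_⟩
      have : cs.take k ++ ['-'] = cs.take (k + 1) := by
        rw [List.take_add_one, hget]; simp
      rw [this, List.take_append_drop]

-- the two anys agree for every configured set (string level)
theorem pv_any_eq (normalized : String) (configured : PySem.Set String) :
    configured.any (fun code =>
        normalized == code || PySem.Str.startswith normalized (code ++ "-"))
      = ((((PySem.List.enumerate normalized.toList).filter (fun p => p.2 == '-')).map
            (fun p => p.1)) ++ [(normalized.toList.length : Int)]).any
          (fun i => PySem.Set.contains configured (PySem.Str.slice normalized none (some i))) := by
  rw [Bool.eq_iff_iff, List.any_eq_true, List.any_eq_true]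
  constructor
  · rintro ⟨code, hmem, hP⟩
    simp only [Bool.or_eq_true, beq_iff_eq, PySem.Str.startswith_eq,
      PySem.Chars.startswith_iff, String.toList_append] at hP
    have hP' : normalized.toList = code.toList ∨ code.toList ++ ['-'] <+: normalized.toList := by
      rcases hP with h | h
      · exact Or.inl (by rw [h])
      · exact Or.inr (by simpa using h)
    obtain ⟨k, hk, htake⟩ := (pv_prefix_dash normalized.toList code.toList).mp hP'
    refine ⟨(k : Int), (pv_mem_boundaries normalized.toList k).mpr ⟨k, rfl, hk⟩, ?_⟩
    rw [PySem.Set.contains_iff]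
    have : PySem.Str.slice normalized none (some (k : Int)) = code := by
      apply String.toList_inj.mp
      rw [PySem.Str.toList_slice]; simp [PySem.Chars.slice, PySem.List.slice_to_natCast, htake]
    rwa [this]
  · rintro ⟨i, hmem, hQ⟩
    obtain ⟨k, rfl, hk⟩ := (pv_mem_boundaries normalized.toList i).mp hmem
    rw [PySem.Set.contains_iff] at hQ
    refine ⟨PySem.Str.slice normalized none (some (k : Int)), hQ, ?_⟩
    simp only [Bool.or_eq_true, beq_iff_eq, PySem.Str.startswith_eq,
      PySem.Chars.startswith_iff, String.toList_append]
    have htake : (PySem.Str.slice normalized none (some (k : Int))).toList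
        = normalized.toList.take k := by
      rw [PySem.Str.toList_slice]; simp [PySem.Chars.slice, PySem.List.slice_to_natCast]
    have := (pv_prefix_dash normalized.toList (normalized.toList.take k)).mpr ⟨k, hk, rfl⟩
    rcases this with h | h
    · exact Or.inl (String.toList_inj.mp (by rw [htake, ← h]))
    · exact Or.inr (by simpa [htake] using h)

-- ===== VERDICT (by name: the statement is the Claim_ definition above) =====
theorem is_turkish_language_py_spec : Claim_equal_is_turkish_language_py := by
  intro language_code configured_codes_raw _
  unfold Spec_is_turkish_language_py is_turkish_language_py is_turkish_language_py_alt
  by_cases h : pvNormalize language_code == ""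
  · simp [h]
  · simp only [h, if_false, Bool.false_eq_true]
    exact pv_any_eq (pvNormalize language_code) (pvConfigured configured_codes_raw)
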